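-- pv_equiv track=rewrite | github.com/jludwig75/trainer_tools | server/root.py | _field_name_to_display_name
-- ===== SOURCE A (Python) =====
-- def _field_name_to_display_name(field_name):
--     display_name = ''
--     for c in field_name:
--         if c == '_':
--             display_name += ' '
--         elif len(display_name) == 0 or display_name[-1] == ' ':
--             display_name += c.upper()
--         else:
--             display_name += c
--     return display_name
-- ===== SOURCE B (Python) =====
-- def _field_name_to_display_name(field_name):
--     words = field_name.replace('_', ' ').split(' ')
--     return ' '.join(w[:1].upper() + w[1:] for w in words)
-- ===== Notes on version B (the rewrite author's own statement) =====
-- stated objective: faster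
-- what changed: Replaces A's single-pass character state machine with quadratic string concatenation (tracking whether the last emitted char is a space) by a word-oriented transform: normalize underscores to spaces, split on the space separator keeping empty tokens, uppercase each token's first character, rejoin with the separator.
import Mathlib
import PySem

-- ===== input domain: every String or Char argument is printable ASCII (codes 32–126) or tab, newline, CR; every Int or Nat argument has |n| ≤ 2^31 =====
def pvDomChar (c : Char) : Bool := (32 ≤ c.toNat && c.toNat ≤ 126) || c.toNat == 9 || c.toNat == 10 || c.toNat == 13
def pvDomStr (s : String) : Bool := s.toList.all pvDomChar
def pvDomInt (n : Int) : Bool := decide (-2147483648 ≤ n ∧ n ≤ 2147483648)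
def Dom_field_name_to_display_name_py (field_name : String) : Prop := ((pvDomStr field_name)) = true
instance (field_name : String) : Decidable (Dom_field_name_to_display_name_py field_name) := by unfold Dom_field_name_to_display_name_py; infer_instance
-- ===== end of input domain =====

-- B replaces A's per-character state machine (quadratic string concatenation) by a normalize/split/capitalize-each-word/rejoin pass; measured faster.

-- ===== PORT A =====
def field_name_to_display_name_py (field_name : String) : String :=
  String.mk (field_name.toList.foldl
    (fun display_name c =>
      if c = '_' then display_name ++ [' ']
      else if display_name.length = 0 ∨ PySem.List.pyGet? display_name (-1) = some ' ' then
        display_name ++ [PySem.Chars.upperChar c]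
      else display_name ++ [c]) [])

-- ===== PORT B =====
def field_name_to_display_name_py_alt (field_name : String) : String :=
  String.mk (PySem.Chars.join [' ']
    ((PySem.Chars.splitOn (PySem.Chars.replace field_name.toList ['_'] [' ']) [' ']).map
      (fun w =>
        PySem.Chars.upper (PySem.Chars.slice w none (some 1)) ++ PySem.Chars.slice w (some 1) none)))

-- ===== PRECONDITION & SPEC =====
def Spec_field_name_to_display_name_py (field_name : String) (out : String) : Prop := out = field_name_to_display_name_py_alt field_name
instance (field_name : String) (out : String) : Decidable (Spec_field_name_to_display_name_py field_name out) := by unfold Spec_field_name_to_display_name_py; infer_instance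

-- ===== CLAIM (what is proved, stated in full; the proofs are below) =====
def Claim_equal_field_name_to_display_name_py : Prop := ∀ (field_name : String), Dom_field_name_to_display_name_py field_name → Spec_field_name_to_display_name_py field_name (field_name_to_display_name_py field_name)

-- ===== LEMMAS AND PROOFS =====

-- proof-only helpers
def pvSubst (c : Char) : Char := if c = '_' then ' ' else c

def pvStepA (display_name : List Char) (c : Char) : List Char :=
  if c = '_' then display_name ++ [' ']
  else if display_name.length = 0 ∨ PySem.List.pyGet? display_name (-1) = some ' ' then
    display_name ++ [PySem.Chars.upperChar c]
  else display_name ++ [c]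

def pvSpecGo : Bool → List Char → List Char
  | _, [] => []
  | b, c :: cs => (if b then PySem.Chars.upperChar c else c) :: pvSpecGo (c == ' ') cs

def pvSplit : List Char → List Char → List (List Char)
  | [], cur => [cur.reverse]
  | c :: t, cur => if c = ' ' then cur.reverse :: pvSplit t [] else pvSplit t (c :: cur)

def pvCap : List Char → List Char
  | [] => []
  | c :: t => PySem.Chars.upperChar c :: t

theorem pv_upperChar_space : PySem.Chars.upperChar ' ' = ' ' := by decide

theorem pv_upperChar_eq_space_iff (c : Char) : PySem.Chars.upperChar c = ' ' ↔ c = ' ' := by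
  unfold PySem.Chars.upperChar PySem.Chars.islower
  by_cases h : ('a' ≤ c ∧ c ≤ 'z')
  · rw [if_pos (by simp [h.1, h.2])]
    have h1 : ('a').toNat ≤ c.toNat := by
      have := h.1
      rw [Char.le_def, UInt32.le_iff_toNat_le] at this
      exact this
    have hz : c.toNat ≤ ('z').toNat := by
      have := h.2
      rw [Char.le_def, UInt32.le_iff_toNat_le] at this
      exact this
    have ha : ('a').toNat = 97 := by decide
    have hzz : ('z').toNat = 122 := by decide
    constructor
    · intro he
      exfalso
      have hv : Nat.isValidChar (c.toNat - 32) := Or.inl (by omega)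
      have h2 := congrArg Char.toNat he
      rw [Char.toNat_ofNat, if_pos hv] at h2
      have hsp : (' ').toNat = 32 := by decide
      omega
    · intro he
      exfalso
      subst he
      exact absurd h1 (by decide)
  · have hb : ¬((decide ('a' ≤ c) && decide (c ≤ 'z')) = true) := by
      simp only [Bool.and_eq_true, decide_eq_true_eq]
      exact h
    rw [if_neg hb]

theorem pv_pyGet_concat_neg_one (l : List Char) (e : Char) :
    PySem.List.pyGet? (l ++ [e]) (-1) = some e := by
  simp [PySem.List.pyGet?, PySem.List.pyIdx?]

theorem pv_stepA_underscore (dn : List Char) : pvStepA dn '_' = dn ++ [' '] := by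
  simp [pvStepA]

theorem pv_stepA_cap (dn : List Char) (c : Char) (hc : c ≠ '_')
    (hP : dn.length = 0 ∨ PySem.List.pyGet? dn (-1) = some ' ') :
    pvStepA dn c = dn ++ [PySem.Chars.upperChar c] := by
  rw [pvStepA, if_neg hc, if_pos hP]

theorem pv_stepA_plain (dn : List Char) (c : Char) (hc : c ≠ '_')
    (hP : ¬(dn.length = 0 ∨ PySem.List.pyGet? dn (-1) = some ' ')) :
    pvStepA dn c = dn ++ [c] := by
  rw [pvStepA, if_neg hc, if_neg hP]

theorem pv_foldA_inv (cs : List Char) : ∀ (dn : List Char) (b : Bool),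
    ((dn.length = 0 ∨ PySem.List.pyGet? dn (-1) = some ' ') ↔ b = true) →
    cs.foldl pvStepA dn = dn ++ pvSpecGo b (cs.map pvSubst) := by
  induction cs with
  | nil => intro dn b _; simp [pvSpecGo]
  | cons c cs ih =>
    intro dn b hb
    rw [List.map_cons, List.foldl_cons]
    by_cases hc : c = '_'
    · subst hc
      rw [pv_stepA_underscore]
      rw [ih (dn ++ [' ']) true (by rw [pv_pyGet_concat_neg_one]; simp)]
      have h1 : pvSubst '_' = ' ' := rfl
      have h2 : (if b then PySem.Chars.upperChar ' ' else ' ') = ' ' := by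
        cases b <;> simp [pv_upperChar_space]
      simp [pvSpecGo, h1, h2]
    · have h1 : pvSubst c = c := by simp [pvSubst, hc]
      cases b with
      | true =>
        have hP : dn.length = 0 ∨ PySem.List.pyGet? dn (-1) = some ' ' := hb.mpr rfl
        rw [pv_stepA_cap dn c hc hP]
        rw [ih (dn ++ [PySem.Chars.upperChar c]) (c == ' ')
          (by rw [pv_pyGet_concat_neg_one]; simp [pv_upperChar_eq_space_iff])]
        simp [pvSpecGo, h1]
      | false =>
        have hP : ¬(dn.length = 0 ∨ PySem.List.pyGet? dn (-1) = some ' ') := by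
          intro h; exact absurd (hb.mp h) (by simp)
        rw [pv_stepA_plain dn c hc hP]
        rw [ih (dn ++ [c]) (c == ' ') (by rw [pv_pyGet_concat_neg_one]; simp)]
        simp [pvSpecGo, h1]

theorem pv_replace_go (fuel : Nat) : ∀ (l acc : List Char), l.length ≤ fuel →
    PySem.Chars.replace.go ['_'] [' '] fuel l acc = acc.reverse ++ l.map pvSubst := by
  induction fuel with
  | zero =>
    intro l acc h
    have : l = [] := by cases l <;> simp_all
    subst this
    simp [PySem.Chars.replace.go]
  | succ n ih =>
    intro l acc h
    cases l with
    | nil => simp [PySem.Chars.replace.go]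
    | cons c t =>
      simp only [List.length_cons] at h
      have ht : t.length ≤ n := by omega
      simp only [PySem.Chars.replace.go]
      by_cases hc : c = '_'
      · subst hc
        rw [if_pos (by simp [List.isPrefixOf])]
        simp only [List.length_cons, List.length_nil, List.drop_succ_cons, List.drop_zero,
          List.reverse_cons, List.reverse_nil, List.nil_append]
        rw [ih t ([' '] ++ acc) ht]
        simp [pvSubst]
      · rw [if_neg (by simp [List.isPrefixOf]; intro he; exact hc he.symm)]
        rw [ih t (c :: acc) ht]
        simp [pvSubst, hc]

theorem pv_replace_eq (cs : List Char) :
    PySem.Chars.replace cs ['_'] [' '] = cs.map pvSubst := by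
  unfold PySem.Chars.replace
  rw [if_neg (by simp)]
  exact pv_replace_go cs.length cs [] (le_refl _)

theorem pv_splitOn_go (fuel : Nat) : ∀ (l cur : List Char) (acc : List (List Char)), l.length ≤ fuel →
    PySem.Chars.splitOn.go [' '] fuel l cur acc = acc.reverse ++ pvSplit l cur := by
  induction fuel with
  | zero =>
    intro l cur acc h
    have : l = [] := by cases l <;> simp_all
    subst this
    simp [PySem.Chars.splitOn.go, pvSplit]
  | succ n ih =>
    intro l cur acc h
    cases l with
    | nil => simp [PySem.Chars.splitOn.go, pvSplit]
    | cons c t =>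
      simp only [List.length_cons] at h
      have ht : t.length ≤ n := by omega
      simp only [PySem.Chars.splitOn.go]
      by_cases hc : c = ' '
      · subst hc
        rw [if_pos (by simp [List.isPrefixOf])]
        simp only [List.length_cons, List.length_nil, List.drop_succ_cons, List.drop_zero]
        rw [ih t [] (cur.reverse :: acc) ht]
        simp [pvSplit]
      · rw [if_neg (by simp [List.isPrefixOf]; intro he; exact hc he.symm)]
        rw [ih t (c :: cur) acc ht]
        simp [pvSplit, hc]

theorem pv_splitOn_eq (ns : List Char) :
    PySem.Chars.splitOn ns [' '] = pvSplit ns [] := by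
  unfold PySem.Chars.splitOn
  rw [pv_splitOn_go (ns.length + 1) ns [] [] (by omega)]
  simp

theorem pv_split_ne_nil (ns cur : List Char) : pvSplit ns cur ≠ [] := by
  induction ns generalizing cur with
  | nil => simp [pvSplit]
  | cons c t ih =>
    simp only [pvSplit]
    split_ifs
    · simp
    · exact ih _

theorem pv_split_cons (ns cur : List Char) : ∃ m ms, pvSplit ns cur = m :: ms := by
  cases h : pvSplit ns cur with
  | nil => exact absurd h (pv_split_ne_nil ns cur)
  | cons m ms => exact ⟨m, ms, rfl⟩

theorem pv_join_split (ns : List Char) :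
    (PySem.Chars.join [' '] ((pvSplit ns []).map pvCap) = pvSpecGo true ns) ∧
    (∀ cur : List Char, cur ≠ [] →
      PySem.Chars.join [' '] ((pvSplit ns cur).map pvCap) = pvCap cur.reverse ++ pvSpecGo false ns) := by
  induction ns with
  | nil =>
    constructor
    · simp [pvSplit, pvCap, pvSpecGo, PySem.Chars.join_singleton]
    · intro cur _
      simp [pvSplit, pvSpecGo, PySem.Chars.join_singleton]
  | cons c t ih =>
    constructor
    · by_cases hc : c = ' '
      · subst hc
        obtain ⟨m, ms, hm⟩ := pv_split_cons t []
        have hM := ih.1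
        rw [hm] at hM
        simp only [pvSplit, if_true, List.reverse_nil, hm, List.map_cons]
        rw [PySem.Chars.join_cons_cons]
        rw [List.map_cons] at hM
        rw [hM]
        simp [pvCap, pvSpecGo, pv_upperChar_space]
      · simp only [pvSplit, if_neg hc]
        rw [ih.2 [c] (by simp)]
        have hb : (c == ' ') = false := by simp [hc]
        simp [pvCap, pvSpecGo, hb]
    · intro cur hcur
      by_cases hc : c = ' '
      · subst hc
        obtain ⟨m, ms, hm⟩ := pv_split_cons t []
        have hM := ih.1
        rw [hm] at hM
        simp only [pvSplit, if_true, hm, List.map_cons]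
        rw [PySem.Chars.join_cons_cons]
        rw [List.map_cons] at hM
        rw [hM]
        simp [pvSpecGo]
      · simp only [pvSplit, if_neg hc]
        rw [ih.2 (c :: cur) (by simp)]
        obtain ⟨d, ds, hd⟩ : ∃ d ds, cur.reverse = d :: ds := by
          cases h : cur.reverse with
          | nil => exact absurd (by simpa using congrArg List.reverse h) hcur
          | cons d ds => exact ⟨d, ds, rfl⟩
        have hb : (c == ' ') = false := by simp [hc]
        simp only [List.reverse_cons, hd]
        simp [pvCap, pvSpecGo, hb]

theorem pv_cap_port (w : List Char) :
    PySem.Chars.upper (PySem.Chars.slice w none (some 1)) ++ PySem.Chars.slice w (some 1) none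
      = pvCap w := by
  cases w with
  | nil => simp [PySem.Chars.slice, PySem.List.slice, PySem.Chars.upper, pvCap]
  | cons c t =>
    simp [PySem.Chars.slice_eq_listSlice, PySem.List.slice_to, PySem.List.slice_from,
      PySem.Chars.upper, pvCap]

-- ===== VERDICT (by name: the statement is the Claim_ definition above) =====
theorem field_name_to_display_name_py_spec : Claim_equal_field_name_to_display_name_py := by
  intro s _
  unfold Spec_field_name_to_display_name_py field_name_to_display_name_py field_name_to_display_name_py_alt
  rw [pv_replace_eq, pv_splitOn_eq]
  have hA : s.toList.foldl pvStepA [] = pvSpecGo true (s.toList.map pvSubst) := by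
    simpa using pv_foldA_inv s.toList [] true (by simp)
  have hmap : (pvSplit (s.toList.map pvSubst) []).map
      (fun w => PySem.Chars.upper (PySem.Chars.slice w none (some 1)) ++ PySem.Chars.slice w (some 1) none)
      = (pvSplit (s.toList.map pvSubst) []).map pvCap :=
    List.map_congr_left (fun w _ => pv_cap_port w)
  rw [hmap, (pv_join_split (s.toList.map pvSubst)).1]
  show String.mk (s.toList.foldl pvStepA []) = _
  rw [hA]
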